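-- pv_equiv track=rewrite | github.com/MrBrantCode/unitest_baseline | mut_generate/mist_train_taco/taco_5363/solution.py | determine_game_winner
-- ===== SOURCE A (Python) =====
-- def determine_game_winner(x, y):
--     player_one = 'Ciel'
--     player_two = 'Hanako'
--
--     # Calculate the number of full moves that can be made initially
--     full_moves = min([x // 2, y // 24])
--     x -= full_moves * 2
--     y -= full_moves * 24
--
--     while True:
--         # Ciel's turn
--         if 100 * x + 10 * y >= 220 and y >= 2:
--             tmp = min([2, x])
--             x -= tmp
--             y -= (220 - 100 * tmp) // 10
--         else:
--             return player_two
--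
--         # Hanako's turn
--         if 100 * x + 10 * y >= 220 and y >= 2:
--             if y >= 22:
--                 y -= 22
--             elif y >= 12:
--                 y -= 12
--                 x -= 1
--             else:
--                 y -= 2
--                 x -= 2
--         else:
--             return player_one
-- ===== SOURCE B (Python) =====
-- def _small(x, y):
--     # Winner with Ciel to move, 0 <= y <= 23, 0 <= x.  y shrinks every round,
--     # so this resolves in at most a dozen steps.
--     if x >= 2:
--         if y < 2:
--             return 'Hanako'
--         x, y = x - 2, y - 2
--     elif x == 1:
--         if y < 12:
--             return 'Hanako'
--         x, y = 0, y - 12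
--     else:
--         if y < 22:
--             return 'Hanako'
--         y -= 22
--     # Hanako's reply (y is now at most 21)
--     if y >= 12 and x >= 1:
--         return _small(x - 1, y - 12)
--     if y >= 2 and x >= 2:
--         return _small(x - 2, y - 2)
--     return 'Ciel'
--
--
-- def determine_game_winner(x, y):
--     # Normalize: take out k whole (2 hundreds, 24 tens) double-rounds; the
--     # residue has x < 2 or y < 24 (and both nonnegative).
--     k = min(x // 2, y // 24)
--     x -= 2 * k
--     y -= 24 * k
--     if x < 2:
--         # Pure 44-tens cycle: closed form instead of looping over y.
--         return 'Ciel' if 22 - 10 * x <= y % 44 < 44 - 10 * x else 'Hanako'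
--     return _small(x, y)
-- ===== Notes on version B (the rewrite author's own statement) =====
-- stated objective: faster
-- what changed: B replaces A's unbounded turn-by-turn while-loop with a closed-form mod-44 formula for the x<2 residue and a bounded (at most 12-round) small-state recursion for the y<24 residue, so the game is decided arithmetically instead of simulated round by round.
import Mathlib
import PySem

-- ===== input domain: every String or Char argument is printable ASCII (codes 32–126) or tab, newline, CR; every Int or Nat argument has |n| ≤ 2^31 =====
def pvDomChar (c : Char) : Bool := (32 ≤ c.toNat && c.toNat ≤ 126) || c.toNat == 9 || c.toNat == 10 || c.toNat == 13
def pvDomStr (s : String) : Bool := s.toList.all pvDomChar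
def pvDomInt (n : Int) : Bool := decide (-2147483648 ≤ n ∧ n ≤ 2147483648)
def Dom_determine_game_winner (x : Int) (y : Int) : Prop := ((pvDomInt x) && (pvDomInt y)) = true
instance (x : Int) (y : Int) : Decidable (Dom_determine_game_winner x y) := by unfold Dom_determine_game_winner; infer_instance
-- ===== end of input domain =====

-- B replaces A's unbounded turn-by-turn loop with a mod-44 closed form for the x<2 residue
-- plus a bounded small-state resolution for the y<24 residue.

-- ===== PORT A =====
-- The while-loop of A, as well-founded recursion: each continuing round removes exactly 440
-- from 100*x+10*y, which the second guard bounds below by 220.  Python's '//' is ported with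
-- PySem.Int.floordiv (here (220 - 100*tmp) is a multiple of 10, so it is exact division).
def determine_game_winner_loop (x : Int) (y : Int) : String :=
  if h1 : 100 * x + 10 * y ≥ 220 ∧ y ≥ 2 then
    -- Ciel's turn
    let tmp := min 2 x
    let x1 := x - tmp
    let y1 := y - PySem.Int.floordiv (220 - 100 * tmp) 10
    if h2 : 100 * x1 + 10 * y1 ≥ 220 ∧ y1 ≥ 2 then
      -- Hanako's turn
      if y1 ≥ 22 then determine_game_winner_loop x1 (y1 - 22)
      else if y1 ≥ 12 then determine_game_winner_loop (x1 - 1) (y1 - 12)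
      else determine_game_winner_loop (x1 - 2) (y1 - 2)
    else "Ciel"
  else "Hanako"
termination_by (100 * x + 10 * y).toNat
decreasing_by
  all_goals
    have hd : PySem.Int.floordiv (220 - 100 * min 2 x) 10 = 22 - 10 * min 2 x := by
      rw [PySem.Int.floordiv_eq_ediv_of_pos (by omega)]; omega
    simp only [tmp, x1, y1, hd] at *
    omega

def determine_game_winner (x : Int) (y : Int) : String :=
  -- full_moves = min([x // 2, y // 24])
  let full_moves := min (PySem.Int.floordiv x 2) (PySem.Int.floordiv y 24)
  let x := x - full_moves * 2
  let y := y - full_moves * 24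
  determine_game_winner_loop x y

-- ===== PORT B =====
-- One round on a small state (0 ≤ y ≤ 23), Ciel to move; y shrinks every round.
def small_alt (x : Int) (y : Int) : String :=
  if x ≥ 2 then
    if y < 2 then "Hanako"
    else
      -- Hanako's reply from (x-2, y-2)
      if y - 2 ≥ 12 ∧ x - 2 ≥ 1 then small_alt (x - 2 - 1) (y - 2 - 12)
      else if y - 2 ≥ 2 ∧ x - 2 ≥ 2 then small_alt (x - 2 - 2) (y - 2 - 2)
      else "Ciel"
  else if x = 1 then
    if y < 12 then "Hanako"
    else
      -- Hanako's reply from (0, y-12)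
      if y - 12 ≥ 12 ∧ (0 : Int) ≥ 1 then small_alt (0 - 1) (y - 12 - 12)
      else if y - 12 ≥ 2 ∧ (0 : Int) ≥ 2 then small_alt (0 - 2) (y - 12 - 2)
      else "Ciel"
  else
    if y < 22 then "Hanako"
    else
      -- Hanako's reply from (x, y-22)
      if y - 22 ≥ 12 ∧ x ≥ 1 then small_alt (x - 1) (y - 22 - 12)
      else if y - 22 ≥ 2 ∧ x ≥ 2 then small_alt (x - 2) (y - 22 - 2)
      else "Ciel"
termination_by y.toNat
decreasing_by all_goals omega

def determine_game_winner_alt (x : Int) (y : Int) : String :=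
  let k := min (PySem.Int.floordiv x 2) (PySem.Int.floordiv y 24)
  let x' := x - 2 * k
  let y' := y - 24 * k
  if x' < 2 then
    if 22 - 10 * x' ≤ PySem.Int.mod y' 44 ∧ PySem.Int.mod y' 44 < 44 - 10 * x' then "Ciel"
    else "Hanako"
  else small_alt x' y'

-- ===== PRECONDITION & SPEC =====
def Spec_determine_game_winner (x : Int) (y : Int) (out : String) : Prop := out = determine_game_winner_alt x y
instance (x : Int) (y : Int) (out : String) : Decidable (Spec_determine_game_winner x y out) := by unfold Spec_determine_game_winner; infer_instance

-- ===== CLAIM (what is proved, stated in full; the proofs are below) =====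
def Claim_equal_determine_game_winner : Prop := ∀ (x : Int) (y : Int), Dom_determine_game_winner x y → Spec_determine_game_winner x y (determine_game_winner x y)

-- ===== LEMMAS AND PROOFS =====

-- Ciel's exact payment in tens: (220 - 100 * min 2 x) // 10 = 22 - 10 * min 2 x.
theorem pay_eq (x : Int) : PySem.Int.floordiv (220 - 100 * min 2 x) 10 = 22 - 10 * min 2 x := by
  rw [PySem.Int.floordiv_eq_ediv_of_pos (by omega)]; omega

-- One-round unfolding of the loop with the division evaluated.
theorem loop_unfold (x y : Int) :
    determine_game_winner_loop x y =
      if 100 * x + 10 * y ≥ 220 ∧ y ≥ 2 then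
        if 100 * (x - min 2 x) + 10 * (y - (22 - 10 * min 2 x)) ≥ 220 ∧ y - (22 - 10 * min 2 x) ≥ 2 then
          if y - (22 - 10 * min 2 x) ≥ 22 then determine_game_winner_loop (x - min 2 x) (y - (22 - 10 * min 2 x) - 22)
          else if y - (22 - 10 * min 2 x) ≥ 12 then determine_game_winner_loop (x - min 2 x - 1) (y - (22 - 10 * min 2 x) - 12)
          else determine_game_winner_loop (x - min 2 x - 2) (y - (22 - 10 * min 2 x) - 2)
        else "Ciel"
      else "Hanako" := by
  rw [determine_game_winner_loop]
  simp only [pay_eq]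
  split_ifs <;> rfl

-- x = 0 residue: a pure 44-per-round cycle on y.
theorem loop_zero : ∀ n : Nat, ∀ y : Int, 0 ≤ y → y.toNat = n →
    determine_game_winner_loop 0 y = (if 22 ≤ y % 44 then "Ciel" else "Hanako") := by
  intro n
  induction n using Nat.strong_induction_on with
  | _ n ih =>
    intro y hy hn
    have hmin : min (2 : Int) 0 = 0 := by omega
    rw [loop_unfold, hmin]
    by_cases h44 : 44 ≤ y
    · rw [if_pos (by omega), if_pos (by omega), if_pos (by omega)]
      rw [show (0 : Int) - 0 = 0 from by ring, show y - (22 - 10 * 0) - 22 = y - 44 from by ring]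
      rw [ih (y - 44).toNat (by omega) (y - 44) (by omega) rfl]
      have : (y - 44) % 44 = y % 44 := by omega
      rw [this]
    · by_cases h22 : 22 ≤ y
      · rw [if_pos (by omega), if_neg (by omega), if_pos (by omega)]
      · rw [if_neg (by omega), if_neg (by omega)]

-- x = 1 residue: one forced exchange, then the x = 0 cycle.
theorem loop_one (y : Int) (hy : 0 ≤ y) :
    determine_game_winner_loop 1 y = (if 12 ≤ y % 44 ∧ y % 44 ≤ 33 then "Ciel" else "Hanako") := by
  have hmin : min (2 : Int) 1 = 1 := by omega
  rw [loop_unfold, hmin]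
  by_cases h34 : 34 ≤ y
  · rw [if_pos (by omega), if_pos (by omega), if_pos (by omega)]
    rw [show (1 : Int) - 1 = 0 from by ring, show y - (22 - 10 * 1) - 22 = y - 34 from by ring]
    rw [loop_zero (y - 34).toNat (y - 34) (by omega) rfl]
    split_ifs <;> first | rfl | omega
  · by_cases h12 : 12 ≤ y
    · rw [if_pos (by omega), if_neg (by omega), if_pos (by omega)]
    · rw [if_neg (by omega), if_neg (by omega)]

-- y ≤ 23 residue: the loop coincides with B's small-state recursion.
theorem loop_small (x y : Int) (hx : 0 ≤ x) (hy : 0 ≤ y) (hy23 : y ≤ 23) :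
    determine_game_winner_loop x y = small_alt x y := by
  by_cases h2 : x ≥ 2
  · rw [loop_unfold, small_alt, show min 2 x = 2 from by omega]
    norm_num
    split_ifs <;> first | rfl | omega | exact loop_small _ _ (by omega) (by omega) (by omega)
  · have hx01 : x = 0 ∨ x = 1 := by omega
    rcases hx01 with h | h <;> subst h <;>
      · rw [loop_unfold, small_alt]
        norm_num
        split_ifs <;> first | rfl | omega
termination_by y.toNat
decreasing_by all_goals omega

-- ===== VERDICT (by name: the statement is the Claim_ definition above) =====
theorem determine_game_winner_spec : Claim_equal_determine_game_winner := by
  intro x y _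
  unfold Spec_determine_game_winner determine_game_winner determine_game_winner_alt
  dsimp only
  have e2 : PySem.Int.floordiv x 2 = x / 2 := PySem.Int.floordiv_eq_ediv_of_pos (by omega)
  have e24 : PySem.Int.floordiv y 24 = y / 24 := PySem.Int.floordiv_eq_ediv_of_pos (by omega)
  rw [e2, e24]
  set k : Int := min (x / 2) (y / 24) with hk
  have hkx : k ≤ x / 2 := min_le_left _ _
  have hky : k ≤ y / 24 := min_le_right _ _
  have hk' : k = x / 2 ∨ k = y / 24 := min_choice _ _
  have hx' : 0 ≤ x - k * 2 := by omega
  have hy' : 0 ≤ y - k * 24 := by omega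
  have harg : x - k * 2 = x - 2 * k ∧ y - k * 24 = y - 24 * k := by constructor <;> ring
  rw [harg.1, harg.2]
  by_cases hlt : x - 2 * k < 2
  · rw [if_pos hlt]
    have hm := PySem.Int.mod_eq_emod_of_pos (a := y - 24 * k) (b := 44) (by omega)
    rw [hm]
    by_cases h0 : x - 2 * k = 0
    · rw [h0, loop_zero (y - 24 * k).toNat (y - 24 * k) (by omega) rfl]
      split_ifs <;> first | rfl | omega
    · have h1 : x - 2 * k = 1 := by omega
      rw [h1, loop_one (y - 24 * k) (by omega)]
      split_ifs <;> first | rfl | omega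
  · rw [if_neg hlt]
    have hy23 : y - 24 * k ≤ 23 := by
      rcases hk' with h | h
      · omega
      · omega
    exact loop_small (x - 2 * k) (y - 24 * k) (by omega) (by omega) hy23
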